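-- pv_equiv track=rewrite | github.com/akshay619-dev/founder-multi-agents | v1.py | _find_target_company
-- ===== SOURCE A (Python) =====
-- def _find_target_company(prompt: str, companies: list[str]) -> str | None:
--     """Match the target company — prefer 'Company: <name>' over bare name."""
--     for name in companies:
--         if f"Company: {name}" in prompt or f"company:\n{name}" in prompt:
--             return name
--     for name in companies:
--         if name in prompt:
--             return name
--     return None
-- ===== SOURCE B (Python) =====
-- def _find_target_company(prompt: str, companies: list[str]) -> str | None:
--     """Right-to-left scan keeping the best (tier, name) over the suffix:
--     an earlier labeled match (tier 0) overrides anything later; an earlier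
--     bare match (tier 1) overrides only a later bare match."""
--     best = None  # (tier, name) for the suffix already processed
--     for name in reversed(companies):
--         if f"Company: {name}" in prompt or f"company:\n{name}" in prompt:
--             best = (0, name)
--         elif best is None or best[0] == 1:
--             if name in prompt:
--                 best = (1, name)
--     return best[1] if best is not None else None
-- ===== Notes on version B (the rewrite author's own statement) =====
-- stated objective: alternative
-- what changed: Replaces A's two left-to-right early-return scans with a single right-to-left scan that folds the list into a (tier, name) best-of-suffix accumulator (labeled overrides anything later, bare overrides only later bare).
import Mathlib
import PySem

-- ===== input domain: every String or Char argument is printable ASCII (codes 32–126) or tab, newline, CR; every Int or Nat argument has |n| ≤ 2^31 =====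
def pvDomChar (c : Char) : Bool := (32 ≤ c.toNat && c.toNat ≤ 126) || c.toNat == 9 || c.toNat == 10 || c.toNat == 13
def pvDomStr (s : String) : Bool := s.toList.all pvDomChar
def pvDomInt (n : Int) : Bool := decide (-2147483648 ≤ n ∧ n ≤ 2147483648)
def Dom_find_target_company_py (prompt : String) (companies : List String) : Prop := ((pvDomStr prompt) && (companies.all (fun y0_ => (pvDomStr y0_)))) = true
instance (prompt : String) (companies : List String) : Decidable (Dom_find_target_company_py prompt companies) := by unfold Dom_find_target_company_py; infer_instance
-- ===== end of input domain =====

-- B replaces A's two forward early-return scans by one right-to-left scan with a (tier, name) best-of-suffix accumulator (objective: alternative).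

-- ===== PORT A =====
-- first loop of A: first name whose labeled form occurs in prompt
def pvALoop1 (prompt : String) : List String → Option String
  | [] => none
  | name :: rest =>
    if PySem.Str.isIn ("Company: " ++ name) prompt || PySem.Str.isIn ("company:\n" ++ name) prompt then
      some name
    else pvALoop1 prompt rest

-- second loop of A: first name occurring bare in prompt
def pvALoop2 (prompt : String) : List String → Option String
  | [] => none
  | name :: rest =>
    if PySem.Str.isIn name prompt then some name else pvALoop2 prompt rest

def find_target_company_py (prompt : String) (companies : List String) : Option String :=
  match pvALoop1 prompt companies with
  | some name => some name
  | none => pvALoop2 prompt companies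

-- ===== PORT B =====
-- Python iterates reversed(companies); structurally this is recursion that first
-- computes the best over the tail (the suffix, processed earlier by the reversed
-- loop) and then folds in the head (the element the reversed loop sees last).
def pvBBest (prompt : String) : List String → Option (Int × String)
  | [] => none
  | name :: rest =>
    let best := pvBBest prompt rest
    if PySem.Str.isIn ("Company: " ++ name) prompt || PySem.Str.isIn ("company:\n" ++ name) prompt then
      some (0, name)
    else if best.isNone || (best.map Prod.fst == some 1) then
      if PySem.Str.isIn name prompt then some (1, name) else best
    else best

def find_target_company_py_alt (prompt : String) (companies : List String) : Option String :=
  (pvBBest prompt companies).map Prod.snd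

-- ===== PRECONDITION & SPEC =====
def Spec_find_target_company_py (prompt : String) (companies : List String) (out : Option String) : Prop := out = find_target_company_py_alt prompt companies
instance (prompt : String) (companies : List String) (out : Option String) : Decidable (Spec_find_target_company_py prompt companies out) := by unfold Spec_find_target_company_py; infer_instance

-- ===== CLAIM (what is proved, stated in full; the proofs are below) =====
def Claim_equal_find_target_company_py : Prop := ∀ (prompt : String) (companies : List String), Dom_find_target_company_py prompt companies → Spec_find_target_company_py prompt companies (find_target_company_py prompt companies)

-- ===== LEMMAS AND PROOFS =====
-- characterisation: B's accumulator = labeled-first result tagged 0, else bare-first result tagged 1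
theorem pvBBest_eq (prompt : String) (cs : List String) :
    pvBBest prompt cs =
      match pvALoop1 prompt cs with
      | some n => some (0, n)
      | none => (pvALoop2 prompt cs).map (fun n => (1, n)) := by
  induction cs with
  | nil => simp [pvBBest, pvALoop1, pvALoop2]
  | cons name rest ih =>
    by_cases h : (PySem.Str.isIn ("Company: " ++ name) prompt || PySem.Str.isIn ("company:\n" ++ name) prompt) = true
    · rw [pvBBest, pvALoop1, if_pos h, if_pos h]
    · rw [pvBBest, pvALoop1, if_neg h, if_neg h, ih]
      by_cases hb : PySem.Str.isIn name prompt = true <;>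
        cases h1 : pvALoop1 prompt rest <;>
        cases h2 : pvALoop2 prompt rest <;>
        (simp [pvALoop2, h1, h2]) <;> split_ifs <;> rfl

-- ===== VERDICT (by name: the statement is the Claim_ definition above) =====
theorem find_target_company_py_spec : Claim_equal_find_target_company_py := by
  intro prompt companies _
  unfold Spec_find_target_company_py find_target_company_py find_target_company_py_alt
  rw [pvBBest_eq]
  cases pvALoop1 prompt companies <;> cases pvALoop2 prompt companies <;> rfl
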